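-- pv_equiv track=rewrite | github.com/dwgx/vrchat-il2cpp-re | tools/lift_pinvoke_wrappers.py | to_pascal
-- ===== SOURCE A (Python) =====
-- def to_pascal(s: str) -> str:
--     """snake_case_or_camelCase -> PascalCase. Keeps existing PascalCase intact."""
--     if not s:
--         return s
--     # snake_case -> split on _
--     parts = s.split('_')
--     out = []
--     for p in parts:
--         if not p:
--             continue
--         if p[0].isupper():
--             out.append(p)
--         else:
--             out.append(p[0].upper() + p[1:])
--     return ''.join(out)
-- ===== SOURCE B (Python) =====
-- def to_pascal(s: str) -> str:
--     """snake_case_or_camelCase -> PascalCase. Keeps existing PascalCase intact."""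
--     chars = []
--     at_word_start = True
--     for c in s:
--         if c == '_':
--             at_word_start = True
--         elif at_word_start:
--             chars.append(c.upper())
--             at_word_start = False
--         else:
--             chars.append(c)
--     return ''.join(chars)
-- ===== Notes on version B (the rewrite author's own statement) =====
-- stated objective: alternative
-- what changed: Replaced the split-on-underscore / per-part fixup / join pipeline with a single character scan that carries a word-start flag and emits each character (uppercased at word starts) directly.
import Mathlib
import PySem

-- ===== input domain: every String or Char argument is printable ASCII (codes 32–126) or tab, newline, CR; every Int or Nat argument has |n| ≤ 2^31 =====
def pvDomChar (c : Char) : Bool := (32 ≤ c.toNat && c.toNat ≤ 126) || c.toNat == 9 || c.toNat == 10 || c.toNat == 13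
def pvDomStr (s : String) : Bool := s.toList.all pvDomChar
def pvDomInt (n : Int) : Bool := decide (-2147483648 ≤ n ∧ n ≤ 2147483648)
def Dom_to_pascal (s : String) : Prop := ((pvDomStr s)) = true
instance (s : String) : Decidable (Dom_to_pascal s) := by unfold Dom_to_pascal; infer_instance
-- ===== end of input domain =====

-- B replaces A's split-on-'_' / per-part-fixup / join pipeline by a single character scan
-- with a word-start flag (objective: alternative decomposition, same O(n) cost).


-- ===== PORT A =====
-- literal port of A: split on '_', skip empty parts, keep parts whose first char
-- is already uppercase, otherwise uppercase the first char; join the parts with ''.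
def to_pascal (s : String) : String :=
  if s = "" then s
  else
    let parts := PySem.Chars.splitOn s.toList ['_']
    let out : List (List Char) := parts.foldl (fun out p =>
      match p with
      | [] => out
      | c :: rest =>
        if PySem.Chars.isupper c then out ++ [c :: rest]
        else out ++ [PySem.Chars.upperChar c :: rest]) []
    String.ofList (PySem.Chars.join [] out)

-- ===== PORT B =====
-- literal port of B: one fold over the characters carrying (collected chars, at_word_start).
def to_pascal_alt (s : String) : String :=
  let r := s.toList.foldl (fun (acc : List Char × Bool) c =>
    if c = '_' then (acc.1, true)
    else if acc.2 then (acc.1 ++ [PySem.Chars.upperChar c], false)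
    else (acc.1 ++ [c], false)) ([], true)
  String.ofList (PySem.Chars.join [] (r.1.map (fun c => [c])))

-- ===== PRECONDITION & SPEC =====
def Spec_to_pascal (s : String) (out : String) : Prop := out = to_pascal_alt s
instance (s : String) (out : String) : Decidable (Spec_to_pascal s out) := by unfold Spec_to_pascal; infer_instance

-- ===== CLAIM (what is proved, stated in full; the proofs are below) =====
def Claim_equal_to_pascal : Prop := ∀ (s : String), Dom_to_pascal s → Spec_to_pascal s (to_pascal s)

-- ===== LEMMAS AND PROOFS =====

-- the common specification: emit every non-'_' char, uppercased at a word start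
def pvScan : List Char → Bool → List Char
  | [], _ => []
  | c :: rest, flag =>
    if c = '_' then pvScan rest true
    else (if flag then PySem.Chars.upperChar c else c) :: pvScan rest false

-- A's per-part fixup
def pvFix : List Char → List Char
  | [] => []
  | c :: rest => if PySem.Chars.isupper c then c :: rest else PySem.Chars.upperChar c :: rest

-- recursive form of Python's split('_') (single-char separator)
def pvSplit : List Char → List Char → List (List Char)
  | [], cur => [cur.reverse]
  | c :: rest, cur => if c = '_' then cur.reverse :: pvSplit rest [] else pvSplit rest (c :: cur)

theorem pvFix_cons (c : Char) (rest : List Char) :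
    pvFix (c :: rest) = PySem.Chars.upperChar c :: rest := by
  unfold pvFix PySem.Chars.upperChar
  by_cases h : PySem.Chars.isupper c = true
  · have hl : PySem.Chars.islower c = false := by
      unfold PySem.Chars.isupper at h
      unfold PySem.Chars.islower
      have hA : ('A' : Char).val.toNat = 65 := rfl
      have hZ : ('Z' : Char).val.toNat = 90 := rfl
      have ha : ('a' : Char).val.toNat = 97 := rfl
      have hz : ('z' : Char).val.toNat = 122 := rfl
      simp only [Bool.and_eq_true, decide_eq_true_eq, Char.le_def,
        UInt32.le_iff_toNat_le, hA, hZ, ha, hz, Bool.and_eq_false_iff,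
        decide_eq_false_iff_not, not_le] at h ⊢
      omega
    simp [h, hl]
  · simp [h]

theorem pvFix_append (x y : List Char) (hx : x ≠ []) :
    pvFix (x ++ y) = pvFix x ++ y := by
  cases x with
  | nil => exact absurd rfl hx
  | cons c rest => simp [pvFix_cons]

theorem go_eq (fuel : Nat) : ∀ (l cur : List Char) (hacc : List (List Char)),
    l.length ≤ fuel →
    PySem.Chars.splitOn.go ['_'] fuel l cur hacc = hacc.reverse ++ pvSplit l cur := by
  induction fuel with
  | zero =>
    intro l cur hacc h
    have : l = [] := List.length_eq_zero_iff.mp (Nat.le_zero.mp h)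
    subst this
    simp [PySem.Chars.splitOn.go, pvSplit]
  | succ n ih =>
    intro l cur hacc h
    cases l with
    | nil => simp [PySem.Chars.splitOn.go, pvSplit]
    | cons c rest =>
      simp only [PySem.Chars.splitOn.go]
      by_cases hc : c = '_'
      · subst hc
        have hp : List.isPrefixOf ['_'] ('_' :: rest) = true := by
          simp [List.isPrefixOf]
        rw [if_pos hp]
        have hdrop : List.drop (['_'] : List Char).length ('_' :: rest) = rest := rfl
        rw [hdrop]
        simp only [List.length_cons] at h
        rw [ih rest [] _ (by omega)]
        simp [pvSplit]
      · have hp : List.isPrefixOf ['_'] (c :: rest) = false := by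
          simp [List.isPrefixOf]
          exact fun h' => hc h'.symm
        rw [if_neg (by simp [hp])]
        simp only [List.length_cons] at h
        rw [ih rest (c :: cur) _ (by omega)]
        simp [pvSplit, hc]

theorem splitOn_eq (cs : List Char) :
    PySem.Chars.splitOn cs ['_'] = pvSplit cs [] := by
  unfold PySem.Chars.splitOn
  rw [go_eq (cs.length + 1) cs [] [] (by omega)]
  rfl

theorem join_nil_eq_flatten (parts : List (List Char)) :
    PySem.Chars.join [] parts = parts.flatten := by
  induction parts with
  | nil => simp [PySem.Chars.join_nil]
  | cons a r ih =>
    cases r with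
    | nil => simp [PySem.Chars.join_singleton]
    | cons b r' =>
      rw [PySem.Chars.join_cons_cons, ih]
      simp

theorem foldA (parts : List (List Char)) : ∀ (out : List (List Char)),
    parts.foldl (fun out p =>
      match p with
      | [] => out
      | c :: rest =>
        if PySem.Chars.isupper c then out ++ [c :: rest]
        else out ++ [PySem.Chars.upperChar c :: rest]) out
      = out ++ (parts.filter (· ≠ [])).map pvFix := by
  induction parts with
  | nil => intro out; simp
  | cons p r ih =>
    intro out
    cases p with
    | nil => simp [List.foldl_cons, ih]
    | cons c rest =>
      rw [List.foldl_cons, ih]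
      by_cases h : PySem.Chars.isupper c = true
      · simp [h, pvFix, List.filter]
      · simp [h, pvFix, List.filter]

theorem split_flatten (cs : List Char) : ∀ (cur : List Char),
    (((pvSplit cs cur).filter (· ≠ [])).map pvFix).flatten
      = pvFix cur.reverse ++ pvScan cs (cur = []) := by
  induction cs with
  | nil =>
    intro cur
    cases cur with
    | nil => simp [pvSplit, pvScan, pvFix]
    | cons d cur' => simp [pvSplit, pvScan]
  | cons c rest ih =>
    intro cur
    by_cases hc : c = '_'
    · subst hc
      have h1 : pvSplit ('_' :: rest) cur = cur.reverse :: pvSplit rest [] := by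
        simp [pvSplit]
      rw [h1]
      by_cases hcur : cur = []
      · subst hcur
        simpa [pvScan, pvFix] using ih []
      · have hrev : cur.reverse ≠ [] := by simpa using hcur
        rw [List.filter_cons_of_pos (by simpa using hrev), List.map_cons, List.flatten_cons, ih []]
        simp [pvScan, pvFix]
    · have h1 : pvSplit (c :: rest) cur = pvSplit rest (c :: cur) := by
        simp [pvSplit, hc]
      rw [h1, ih (c :: cur)]
      have h2 : (c :: cur).reverse = cur.reverse ++ [c] := by simp
      rw [h2]
      by_cases hcur : cur = []
      · subst hcur
        simp only [List.reverse_nil, List.nil_append]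
        rw [pvFix_cons]
        simp [pvScan, hc, pvFix]
      · have hrev : cur.reverse ≠ [] := by simpa using hcur
        rw [pvFix_append _ _ hrev]
        simp [pvScan, hc, hcur]

theorem foldB (cs : List Char) : ∀ (acc : List Char) (flag : Bool),
    (cs.foldl (fun (acc : List Char × Bool) c =>
      if c = '_' then (acc.1, true)
      else if acc.2 then (acc.1 ++ [PySem.Chars.upperChar c], false)
      else (acc.1 ++ [c], false)) (acc, flag)).1
      = acc ++ pvScan cs flag := by
  induction cs with
  | nil => intro acc flag; simp [pvScan]
  | cons c rest ih =>
    intro acc flag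
    rw [List.foldl_cons]
    by_cases hc : c = '_'
    · subst hc
      have hstep : (if ('_' : Char) = '_' then ((acc, flag).1, true)
          else if (acc, flag).2 then ((acc, flag).1 ++ [PySem.Chars.upperChar '_'], false)
          else ((acc, flag).1 ++ ['_'], false)) = (acc, true) := by simp
      rw [hstep, ih acc true]
      simp [pvScan]
    · simp only [if_neg hc]
      cases flag with
      | true =>
        have hstep : (if ((acc, true) : List Char × Bool).2 = true
            then ((acc, true).1 ++ [PySem.Chars.upperChar c], false)
            else ((acc, true).1 ++ [c], false))
            = (acc ++ [PySem.Chars.upperChar c], false) := rfl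
        rw [hstep, ih (acc ++ [PySem.Chars.upperChar c]) false]
        simp [pvScan, hc]
      | false =>
        have hstep : (if ((acc, false) : List Char × Bool).2 = true
            then ((acc, false).1 ++ [PySem.Chars.upperChar c], false)
            else ((acc, false).1 ++ [c], false))
            = (acc ++ [c], false) := rfl
        rw [hstep, ih (acc ++ [c]) false]
        simp [pvScan, hc]

-- ===== VERDICT (by name: the statement is the Claim_ definition above) =====
theorem to_pascal_spec : Claim_equal_to_pascal := by
  intro s _
  unfold Spec_to_pascal
  have hB : to_pascal_alt s = String.ofList ([] ++ pvScan s.toList true) := by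
    show String.ofList (PySem.Chars.join [] ((List.foldl (fun (acc : List Char × Bool) c =>
        if c = '_' then (acc.1, true)
        else if acc.2 then (acc.1 ++ [PySem.Chars.upperChar c], false)
        else (acc.1 ++ [c], false)) ([], true) s.toList).1.map (fun c => [c]))) = _
    rw [PySem.Chars.join_nil_singletons, foldB s.toList [] true]
  rw [hB]
  by_cases hs : s = ""
  · subst hs; rfl
  · show (if s = "" then s else String.ofList (PySem.Chars.join [] (List.foldl (fun out p =>
        match p with
        | [] => out
        | c :: rest =>
          if PySem.Chars.isupper c then out ++ [c :: rest]
          else out ++ [PySem.Chars.upperChar c :: rest]) [] (PySem.Chars.splitOn s.toList ['_'])))) = _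
    rw [if_neg hs, splitOn_eq, foldA, join_nil_eq_flatten]
    have h := split_flatten s.toList []
    simp only [List.reverse_nil] at h
    rw [List.nil_append, h]
    simp [pvFix]
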